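-- pv_equiv track=rewrite | github.com/MrBrantCode/unitest_baseline | mut_generate/mist_train_taco/taco_8880/solution.py | count_even_odd_in_matrix
-- ===== SOURCE A (Python) =====
-- def count_even_odd_in_matrix(R, C):
--     """
--     Counts the number of even and odd numbers in a lower triangular matrix of size R x C.
--
--     Parameters:
--     R (int): Number of rows in the matrix.
--     C (int): Number of columns in the matrix.
--
--     Returns:
--     tuple: A tuple containing the count of even numbers and odd numbers in the matrix.
--     """
--     even_count = 0
--     odd_count = 0
--
--     while R > 0:
--         if R % 2 == 0:
--             even_count += min(R, C)
--         else:
--             odd_count += min(R, C)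
--         R -= 1
--
--     return even_count, odd_count
-- ===== SOURCE B (Python) =====
-- def count_even_odd_in_matrix(R, C):
--     Rc = max(R, 0)
--     n = max(0, min(Rc, C))
--     k = n // 2
--     m = (n + 1) // 2
--     even = k * (k + 1) + C * (Rc // 2 - k)
--     odd = m * m + C * ((Rc + 1) // 2 - m)
--     return even, odd
-- ===== Notes on version B (the rewrite author's own statement) =====
-- stated objective: faster
-- what changed: Replaced the O(R) countdown loop that adds min(r,C) per row with O(1) closed-form arithmetic: rows are split at n = clamp(min(R,C)) into a triangular part (even/odd index series formulas k(k+1) and m^2) and a constant-C part counted by parity.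
import Mathlib
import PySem

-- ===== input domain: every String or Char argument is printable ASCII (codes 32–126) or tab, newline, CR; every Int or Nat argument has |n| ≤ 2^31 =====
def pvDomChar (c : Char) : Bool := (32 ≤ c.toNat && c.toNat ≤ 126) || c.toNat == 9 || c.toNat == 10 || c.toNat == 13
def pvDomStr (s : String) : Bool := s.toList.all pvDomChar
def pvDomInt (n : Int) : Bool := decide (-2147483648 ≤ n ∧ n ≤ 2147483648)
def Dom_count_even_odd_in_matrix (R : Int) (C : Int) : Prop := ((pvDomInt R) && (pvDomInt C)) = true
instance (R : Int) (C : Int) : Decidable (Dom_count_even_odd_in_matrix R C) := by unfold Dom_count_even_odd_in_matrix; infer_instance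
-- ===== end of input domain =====

-- B replaces A's O(R) countdown loop with O(1) closed-form series arithmetic (objective: faster).

-- ===== PORT A =====
-- the 'while R > 0' loop: runs R.toNat times, R decremented each pass
def pvAGo : Nat → Int → Int → Int → Int → Int × Int
  | 0, _, _, e, o => (e, o)
  | f+1, R, C, e, o =>
    if R % 2 = 0 then pvAGo f (R - 1) C (e + min R C) o
    else pvAGo f (R - 1) C e (o + min R C)

def count_even_odd_in_matrix (R : Int) (C : Int) : List Int :=
  let p := pvAGo R.toNat R C 0 0
  [p.1, p.2]

-- ===== PORT B =====
def count_even_odd_in_matrix_alt (R : Int) (C : Int) : List Int :=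
  let Rc := max R 0
  let n := max 0 (min Rc C)
  let k := PySem.Int.floordiv n 2
  let m := PySem.Int.floordiv (n + 1) 2
  let even := k * (k + 1) + C * (PySem.Int.floordiv Rc 2 - k)
  let odd := m * m + C * (PySem.Int.floordiv (Rc + 1) 2 - m)
  [even, odd]

-- ===== PRECONDITION & SPEC =====
def Spec_count_even_odd_in_matrix (R : Int) (C : Int) (out : List Int) : Prop := out = count_even_odd_in_matrix_alt R C
instance (R : Int) (C : Int) (out : List Int) : Decidable (Spec_count_even_odd_in_matrix R C out) := by unfold Spec_count_even_odd_in_matrix; infer_instance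

-- ===== CLAIM (what is proved, stated in full; the proofs are below) =====
def Claim_equal_count_even_odd_in_matrix : Prop := ∀ (R : Int) (C : Int), Dom_count_even_odd_in_matrix R C → Spec_count_even_odd_in_matrix R C (count_even_odd_in_matrix R C)

-- ===== LEMMAS AND PROOFS =====

-- closed forms (ediv versions, proof-side)
def pvEc (R C : Int) : Int :=
  (max 0 (min (max R 0) C) / 2) * (max 0 (min (max R 0) C) / 2 + 1)
    + C * (max R 0 / 2 - max 0 (min (max R 0) C) / 2)

def pvOc (R C : Int) : Int :=
  ((max 0 (min (max R 0) C) + 1) / 2) * ((max 0 (min (max R 0) C) + 1) / 2)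
    + C * ((max R 0 + 1) / 2 - (max 0 (min (max R 0) C) + 1) / 2)

lemma alt_eq (R C : Int) :
    count_even_odd_in_matrix_alt R C = [pvEc R C, pvOc R C] := by
  simp only [count_even_odd_in_matrix_alt, pvEc, pvOc,
    PySem.Int.floordiv_eq_ediv_of_pos (a := max 0 (min (max R 0) C)) (by norm_num : (0:Int) < 2),
    PySem.Int.floordiv_eq_ediv_of_pos (a := max 0 (min (max R 0) C) + 1) (by norm_num : (0:Int) < 2),
    PySem.Int.floordiv_eq_ediv_of_pos (a := max R 0) (by norm_num : (0:Int) < 2),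
    PySem.Int.floordiv_eq_ediv_of_pos (a := max R 0 + 1) (by norm_num : (0:Int) < 2)]

lemma pvEc_succ (f : Nat) (C : Int) :
    pvEc ((f : Int) + 1) C
      = pvEc (f : Int) C + (if ((f : Int) + 1) % 2 = 0 then min ((f : Int) + 1) C else 0) := by
  have hf0 : (0:Int) ≤ (f : Int) := by positivity
  have hr1 : max ((f:Int)+1) 0 = (f:Int)+1 := by omega
  have hr2 : max (f:Int) 0 = (f:Int) := by omega
  by_cases hC : C ≤ (f : Int)
  · have hn1 : max 0 (min ((f:Int)+1) C) = max 0 C := by omega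
    have hn2 : max 0 (min (f:Int) C) = max 0 C := by omega
    simp only [pvEc, hr1, hr2]
    rw [hn1, hn2]
    rcases Int.even_or_odd (f:Int) with ⟨j, hj⟩ | ⟨j, hj⟩
    · have e1 : ((f:Int)+1)/2 = j := by omega
      have e2 : (f:Int)/2 = j := by omega
      rw [e1, e2, if_neg (by omega)]; ring
    · have e1 : ((f:Int)+1)/2 = j+1 := by omega
      have e2 : (f:Int)/2 = j := by omega
      have hm : min ((f:Int)+1) C = C := by omega
      rw [e1, e2, if_pos (by omega), hm]; ring
  · have hn1 : max 0 (min ((f:Int)+1) C) = (f:Int)+1 := by omega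
    have hn2 : max 0 (min (f:Int) C) = (f:Int) := by omega
    simp only [pvEc, hr1, hr2]
    rw [hn1, hn2]
    rcases Int.even_or_odd (f:Int) with ⟨j, hj⟩ | ⟨j, hj⟩
    · have e1 : ((f:Int)+1)/2 = j := by omega
      have e2 : (f:Int)/2 = j := by omega
      rw [e1, e2, if_neg (by omega)]; ring
    · have e1 : ((f:Int)+1)/2 = j+1 := by omega
      have e2 : (f:Int)/2 = j := by omega
      have hm : min ((f:Int)+1) C = (f:Int)+1 := by omega
      have hfj : (f:Int) = 2*j+1 := by omega
      rw [e1, e2, if_pos (by omega), hm, hfj]; ring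

lemma pvOc_succ (f : Nat) (C : Int) :
    pvOc ((f : Int) + 1) C
      = pvOc (f : Int) C + (if ((f : Int) + 1) % 2 = 0 then 0 else min ((f : Int) + 1) C) := by
  have hf0 : (0:Int) ≤ (f : Int) := by positivity
  have hr1 : max ((f:Int)+1) 0 = (f:Int)+1 := by omega
  have hr2 : max (f:Int) 0 = (f:Int) := by omega
  by_cases hC : C ≤ (f : Int)
  · have hn1 : max 0 (min ((f:Int)+1) C) = max 0 C := by omega
    have hn2 : max 0 (min (f:Int) C) = max 0 C := by omega
    simp only [pvOc, hr1, hr2]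
    rw [hn1, hn2]
    rcases Int.even_or_odd (f:Int) with ⟨j, hj⟩ | ⟨j, hj⟩
    · have e1 : ((f:Int)+1+1)/2 = j+1 := by omega
      have e2 : ((f:Int)+1)/2 = j := by omega
      have hm : min ((f:Int)+1) C = C := by omega
      rw [e1, e2, if_neg (by omega), hm]; ring
    · have e1 : ((f:Int)+1+1)/2 = j+1 := by omega
      have e2 : ((f:Int)+1)/2 = j+1 := by omega
      rw [e1, e2, if_pos (by omega)]; ring
  · have hn1 : max 0 (min ((f:Int)+1) C) = (f:Int)+1 := by omega
    have hn2 : max 0 (min (f:Int) C) = (f:Int) := by omega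
    simp only [pvOc, hr1, hr2]
    rw [hn1, hn2]
    rcases Int.even_or_odd (f:Int) with ⟨j, hj⟩ | ⟨j, hj⟩
    · have e1 : ((f:Int)+1+1)/2 = j+1 := by omega
      have e2 : ((f:Int)+1)/2 = j := by omega
      have hm : min ((f:Int)+1) C = (f:Int)+1 := by omega
      have hfj : (f:Int) = 2*j := by omega
      rw [e1, e2, if_neg (by omega), hm, hfj]; ring
    · have e1 : ((f:Int)+1+1)/2 = j+1 := by omega
      have e2 : ((f:Int)+1)/2 = j+1 := by omega
      rw [e1, e2, if_pos (by omega)]; ring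

lemma pvEc_zero (C : Int) : pvEc 0 C = 0 := by
  have h1 : max 0 (min (0:Int) C) = 0 := by omega
  have h2 : max (0:Int) 0 = 0 := by omega
  simp only [pvEc, h2, h1]; norm_num

lemma pvOc_zero (C : Int) : pvOc 0 C = 0 := by
  have h1 : max 0 (min (0:Int) C) = 0 := by omega
  have h2 : max (0:Int) 0 = 0 := by omega
  simp only [pvOc, h2, h1]; norm_num

-- loop invariant: running the loop from R = f with accumulators e, o adds the closed forms
lemma pvAGo_closed (f : Nat) : ∀ (C e o : Int),
    pvAGo f (f : Int) C e o = (e + pvEc (f : Int) C, o + pvOc (f : Int) C) := by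
  induction f with
  | zero => intro C e o; simp [pvAGo, pvEc_zero, pvOc_zero]
  | succ f ih =>
    intro C e o
    have hcast : ((f + 1 : Nat) : Int) = (f : Int) + 1 := by push_cast; ring
    have hstep : ((f : Int) + 1) - 1 = (f : Int) := by ring
    by_cases h : ((f : Int) + 1) % 2 = 0
    · simp only [pvAGo, hcast, if_pos h, hstep, ih]
      rw [pvEc_succ, pvOc_succ, if_pos h, if_pos h]; simp only [Prod.mk.injEq]; exact ⟨by ring, by ring⟩
    · simp only [pvAGo, hcast, if_neg h, hstep, ih]
      rw [pvEc_succ, pvOc_succ, if_neg h, if_neg h]; simp only [Prod.mk.injEq]; exact ⟨by ring, by ring⟩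

lemma negative_case (R C : Int) (hR : R ≤ 0) :
    pvEc R C = 0 ∧ pvOc R C = 0 := by
  have h2 : max R 0 = 0 := by omega
  have h1 : max 0 (min (0:Int) C) = 0 := by omega
  constructor <;> simp only [pvEc, pvOc, h2, h1] <;> norm_num

-- ===== VERDICT (by name: the statement is the Claim_ definition above) =====
theorem count_even_odd_in_matrix_spec : Claim_equal_count_even_odd_in_matrix := by
  intro R C _
  unfold Spec_count_even_odd_in_matrix
  rw [alt_eq]
  unfold count_even_odd_in_matrix
  by_cases hR : R ≤ 0
  · have ht : R.toNat = 0 := Int.toNat_of_nonpos hR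
    obtain ⟨hE, hO⟩ := negative_case R C hR
    simp [ht, pvAGo, hE, hO]
  · have ht : ((R.toNat : Nat) : Int) = R := Int.toNat_of_nonneg (by omega)
    have := pvAGo_closed R.toNat C 0 0
    rw [ht] at this
    simp [this]
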